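-- pv_equiv track=rewrite | github.com/thepratholic/Competitive-Programming | LeetCode/Biweekly Contest 157/Find Maximum Number of Non Intersecting Substrings.py | maxSubstrings
-- ===== SOURCE A (Python) =====
-- from collections import defaultdict
--
-- def maxSubstrings(word: str) -> int:
--     pos = defaultdict(list)
--
--     for i, ch in enumerate(word):
--         pos[ch].append(i)
--
--     candidates = []
--
--     for indices in pos.values():
--         for i in range(len(indices)):
--             for j in range(i + 1, len(indices)):
--                 start = indices[i]
--                 end = indices[j]
--                 if end - start + 1 >= 4:
--                     candidates.append((start, end))
--                     break
--
--     candidates.sort(key=lambda x: x[1])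
--
--     ans = 0
--     last_end = -1
--     for start, end in candidates:
--         if start > last_end:
--             ans += 1
--             last_end = end
--
--     return ans
-- ===== SOURCE B (Python) =====
-- def maxSubstrings(word: str) -> int:
--     # One-pass greedy: remember the first occurrence of each character since the
--     # last chosen substring ended; close a substring as soon as one of length >= 4
--     # with equal endpoints becomes available.
--     ans = 0
--     first = {}
--     for i, ch in enumerate(word):
--         s = first.get(ch)
--         if s is None:
--             first[ch] = i
--         elif i - s >= 3:
--             ans += 1
--             first = {}
--     return ans
-- ===== Notes on version B (the rewrite author's own statement) =====
-- stated objective: faster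
-- what changed: Replaced per-character candidate-interval generation plus sort-by-end plus greedy interval scheduling by a single left-to-right pass that tracks the first occurrence of each character since the last chosen end and closes a substring greedily as soon as one of length >= 4 becomes available.
import Mathlib
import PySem

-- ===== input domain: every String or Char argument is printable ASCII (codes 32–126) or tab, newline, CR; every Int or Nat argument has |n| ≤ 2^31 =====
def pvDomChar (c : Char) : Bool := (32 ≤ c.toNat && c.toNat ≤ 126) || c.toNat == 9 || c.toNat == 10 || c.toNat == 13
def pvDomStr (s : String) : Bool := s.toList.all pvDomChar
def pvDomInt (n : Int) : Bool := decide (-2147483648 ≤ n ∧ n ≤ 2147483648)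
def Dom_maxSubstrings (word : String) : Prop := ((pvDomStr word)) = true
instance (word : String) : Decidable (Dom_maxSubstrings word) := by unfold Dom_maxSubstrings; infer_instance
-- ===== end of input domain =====

-- B replaces A's candidate-generation + sort-by-end + greedy interval scheduling by a single
-- left-to-right greedy pass (first occurrence of each character since the last chosen end).

-- ===== PORT A =====
-- inner 'for j in range(i+1, len(indices)): ... break' loop of A
def pvFindEndA (indices : List Int) (start : Int) : List Int → Option Int
  | [] => none
  | j :: js =>
    let e := PySem.List.pyGetD indices j 0
    if e - start + 1 ≥ 4 then some e else pvFindEndA indices start js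

-- 'for i, ch in enumerate(word): pos[ch].append(i)'
def pvBuildPos (cs : List Char) : PySem.Dict Char (List Int) :=
  (PySem.List.enumerate cs).foldl (fun d p => d.modify p.2 [] (fun l => l ++ [p.1])) PySem.Dict.empty

-- 'for i in range(len(indices)): ... candidates.append(...)' (one value list of pos)
def pvInnerScan (indices : List Int) (acc : List (Int × Int)) : List (Int × Int) :=
  (PySem.List.pyRange 0 (PySem.List.len indices)).foldl (fun acc2 i =>
    let start := PySem.List.pyGetD indices i 0
    match pvFindEndA indices start (PySem.List.pyRange (i + 1) (PySem.List.len indices)) with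
    | some e => acc2 ++ [(start, e)]
    | none => acc2) acc

def maxSubstrings (word : String) : Int :=
  let pos := pvBuildPos word.toList
  let candidates := pos.values.foldl (fun acc indices => pvInnerScan indices acc) []
  let sortedC := PySem.List.sorted candidates (fun x => x.2) false
  (sortedC.foldl (fun st p => if p.1 > st.2 then (st.1 + 1, p.2) else st) ((0 : Int), (-1 : Int))).1

-- ===== PORT B =====
-- loop body of B: 's = first.get(ch); if s is None: first[ch] = i; elif i - s >= 3: ans += 1; first = {}'
def pvStepB (st : Int × PySem.Dict Char Int) (p : Int × Char) : Int × PySem.Dict Char Int :=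
  match st.2.get? p.2 with
  | none => (st.1, st.2.insert p.2 p.1)
  | some s => if p.1 - s ≥ 3 then (st.1 + 1, PySem.Dict.empty) else st

def maxSubstrings_alt (word : String) : Int :=
  ((PySem.List.enumerate word.toList).foldl pvStepB ((0 : Int), PySem.Dict.empty)).1

-- ===== PRECONDITION & SPEC =====
def Spec_maxSubstrings (word : String) (out : Int) : Prop := out = maxSubstrings_alt word
instance (word : String) (out : Int) : Decidable (Spec_maxSubstrings word out) := by unfold Spec_maxSubstrings; infer_instance

-- ===== CLAIM (what is proved, stated in full; the proofs are below) =====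
def Claim_equal_maxSubstrings : Prop := ∀ (word : String), Dom_maxSubstrings word → Spec_maxSubstrings word (maxSubstrings word)

-- ===== LEMMAS AND PROOFS =====

-- 'e is a feasible greedy end after last': some start s > last, s + 3 ≤ e, equal characters
def pvGood (cs : List Char) (last : Int) (e : Nat) : Bool :=
  decide (∃ s < e, last < (s : Int) ∧ s + 3 ≤ e ∧ cs.getD s 'A' = cs.getD e 'A')

lemma pvGood_bounds {cs : List Char} {last : Int} {e : Nat}
    (h : pvGood cs last e = true) : last + 4 ≤ (e : Int) := by
  unfold pvGood at h
  obtain ⟨s, hse, hls, hs3, -⟩ := of_decide_eq_true h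
  omega

-- reference function (fuel-based): number of greedy picks, next pick = smallest feasible end
def pvMF (cs : List Char) : Nat → Int → Int
  | 0, _ => 0
  | f + 1, last =>
    match (List.range cs.length).find? (pvGood cs last) with
    | some e => 1 + pvMF cs f (e : Int)
    | none => 0

def pvM (cs : List Char) (last : Int) : Int := pvMF cs (cs.length + 1) last

lemma find?_good_none {cs : List Char} {last : Int}
    (h : (cs.length : Int) ≤ last + 4) :
    (List.range cs.length).find? (pvGood cs last) = none := by
  rw [List.find?_eq_none]
  intro e he
  rcases hb : pvGood cs last e with _ | _
  · simp
  · have h1 := pvGood_bounds hb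
    have h2 := List.mem_range.mp he
    omega

lemma pvMF_congr (cs : List Char) :
    ∀ (f f' : Nat) (last : Int), (cs.length : Int) ≤ last + 4 + (f : Int) →
      (cs.length : Int) ≤ last + 4 + (f' : Int) →
      pvMF cs f last = pvMF cs f' last := by
  intro f
  induction f with
  | zero =>
    intro f' last h h'
    cases f' with
    | zero => rfl
    | succ f'' =>
      simp only [pvMF, find?_good_none (by omega : (cs.length : Int) ≤ last + 4)]
  | succ f ih =>
    intro f' last h h'
    cases f' with
    | zero =>
      simp only [pvMF, find?_good_none (by omega : (cs.length : Int) ≤ last + 4)]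
    | succ f'' =>
      simp only [pvMF]
      rcases hfind : (List.range cs.length).find? (pvGood cs last) with _ | e
      · rfl
      · have h1 := pvGood_bounds (List.find?_some hfind)
        show 1 + pvMF cs f (e : Int) = 1 + pvMF cs f'' (e : Int)
        congr 1
        exact ih f'' (e : Int) (by omega) (by omega)

lemma find?_range_some {P : Nat → Bool} {n e : Nat} (he : e < n) (hP : P e = true)
    (hmin : ∀ t < e, P t = false) : (List.range n).find? P = some e := by
  induction n with
  | zero => omega
  | succ n ih =>
    rw [List.range_succ, List.find?_append]
    rcases Nat.lt_or_ge e n with h | h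
    · rw [ih h]
      rfl
    · have he' : e = n := by omega
      subst he'
      have hnone : (List.range e).find? P = none := by
        rw [List.find?_eq_none]
        intro t ht
        simp [hmin t (List.mem_range.mp ht)]
      rw [hnone]
      simp [hP]

lemma pvM_zero {cs : List Char} {last : Int}
    (h : ∀ e, e < cs.length → pvGood cs last e = false) : pvM cs last = 0 := by
  have hnone : (List.range cs.length).find? (pvGood cs last) = none := by
    rw [List.find?_eq_none]
    intro t ht
    simp [h t (List.mem_range.mp ht)]
  simp only [pvM, pvMF, hnone]

lemma pvM_succ {cs : List Char} {last : Int} {e : Nat} (he : e < cs.length)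
    (hg : pvGood cs last e = true) (hmin : ∀ t, t < e → pvGood cs last t = false) :
    pvM cs last = 1 + pvM cs (e : Int) := by
  have hsome := find?_range_some he hg hmin
  simp only [pvM, pvMF, hsome]
  congr 1
  exact pvMF_congr cs cs.length (cs.length + 1) (e : Int) (by omega) (by omega)

-- ---------- A side ----------

def pvOcc (cs : List Char) (c : Char) : List Nat :=
  (List.range cs.length).filter (fun t => cs.getD t 'A' == c)

lemma mem_pvOcc {cs : List Char} {c : Char} {t : Nat} :
    t ∈ pvOcc cs c ↔ t < cs.length ∧ cs.getD t 'A' = c := by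
  simp [pvOcc, List.mem_filter]

lemma pvOcc_pairwise (cs : List Char) (c : Char) : (pvOcc cs c).Pairwise (· < ·) :=
  List.Pairwise.filter _ List.pairwise_lt_range

lemma pvOcc_strictMono {cs : List Char} {c : Char} {k j : Nat} (hkj : k < j)
    (hj : j < (pvOcc cs c).length) :
    (pvOcc cs c)[k]'(by omega) < (pvOcc cs c)[j]'hj :=
  List.pairwise_iff_getElem.mp (pvOcc_pairwise cs c) k j (by omega) hj hkj

def pvSound (cs : List Char) (q : Int × Int) : Prop :=
  ∃ sN eN : Nat, q = ((sN : Int), (eN : Int)) ∧ sN + 3 ≤ eN ∧ eN < cs.length ∧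
    cs.getD sN 'A' = cs.getD eN 'A'

-- candidates contributed by index position i of one value list of pos
def pvDelta (indices : List Int) (i : Int) : List (Int × Int) :=
  match pvFindEndA indices (PySem.List.pyGetD indices i 0) (PySem.List.pyRange (i + 1) (PySem.List.len indices)) with
  | some e => [(PySem.List.pyGetD indices i 0, e)]
  | none => []

lemma pvInnerScan_eq (indices : List Int) (acc : List (Int × Int)) :
    pvInnerScan indices acc
      = acc ++ (PySem.List.pyRange 0 (PySem.List.len indices)).flatMap (pvDelta indices) := by
  unfold pvInnerScan
  have hstep : (fun (acc2 : List (Int × Int)) (i : Int) =>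
      let start := PySem.List.pyGetD indices i 0
      match pvFindEndA indices start (PySem.List.pyRange (i + 1) (PySem.List.len indices)) with
      | some e => acc2 ++ [(start, e)]
      | none => acc2)
      = fun acc2 i => acc2 ++ pvDelta indices i := by
    funext acc2 i
    show (match pvFindEndA indices (PySem.List.pyGetD indices i 0)
          (PySem.List.pyRange (i + 1) (PySem.List.len indices)) with
      | some e => acc2 ++ [(PySem.List.pyGetD indices i 0, e)]
      | none => acc2) = acc2 ++ pvDelta indices i
    unfold pvDelta
    rcases pvFindEndA indices (PySem.List.pyGetD indices i 0)
        (PySem.List.pyRange (i + 1) (PySem.List.len indices)) with _ | e <;> simp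
  rw [hstep, PySem.List.foldl_append_eq_flatMap]

lemma pvFindEndA_sound {L : List Int} {start e : Int} :
    ∀ a : Nat, pvFindEndA L start (PySem.List.pyRange (a : Int) (PySem.List.len L)) = some e →
      ∃ j : Nat, a ≤ j ∧ j < L.length ∧ e = L.getD j 0 ∧ start + 3 ≤ e := by
  have main : ∀ (m a : Nat), L.length ≤ a + m →
      pvFindEndA L start (PySem.List.pyRange (a : Int) (PySem.List.len L)) = some e →
      ∃ j : Nat, a ≤ j ∧ j < L.length ∧ e = L.getD j 0 ∧ start + 3 ≤ e := by
    intro m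
    induction m with
    | zero =>
      intro a ha h
      rw [PySem.List.pyRange_one_eq_nil (by show (L.length : Int) ≤ (a : Int); omega)] at h
      simp [pvFindEndA] at h
    | succ m ih =>
      intro a ha h
      rcases Nat.lt_or_ge a L.length with haL | haL
      · rw [PySem.List.pyRange_one_cons (by show (a : Int) < (L.length : Int); omega)] at h
        simp only [pvFindEndA] at h
        split_ifs at h with hc
        · refine ⟨a, le_refl a, haL, ?_, ?_⟩
          · rw [← Option.some_inj.mp h, PySem.List.pyGetD_natCast]
          · rw [← Option.some_inj.mp h]
            omega
        · rw [show ((a : Int) + 1) = ((a + 1 : Nat) : Int) from by push_cast; ring] at h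
          obtain ⟨j, hj1, hj2, hj3, hj4⟩ := ih (a + 1) (by omega) h
          exact ⟨j, by omega, hj2, hj3, hj4⟩
      · rw [PySem.List.pyRange_one_eq_nil (by show (L.length : Int) ≤ (a : Int); omega)] at h
        simp [pvFindEndA] at h
  exact fun a => main L.length a (by omega)

lemma pvFindEndA_complete {L : List Int} {start : Int}
    (mono : ∀ k1 k2 : Nat, k1 ≤ k2 → k2 < L.length → L.getD k1 0 ≤ L.getD k2 0) :
    ∀ a j : Nat, a ≤ j → j < L.length → start + 3 ≤ L.getD j 0 →
      ∃ e, pvFindEndA L start (PySem.List.pyRange (a : Int) (PySem.List.len L)) = some e ∧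
        e ≤ L.getD j 0 := by
  have main : ∀ (m a j : Nat), L.length ≤ a + m → a ≤ j → j < L.length → start + 3 ≤ L.getD j 0 →
      ∃ e, pvFindEndA L start (PySem.List.pyRange (a : Int) (PySem.List.len L)) = some e ∧
        e ≤ L.getD j 0 := by
    intro m
    induction m with
    | zero => intro a j ha haj hj _; omega
    | succ m ih =>
      intro a j ha haj hj hstart
      have haL : a < L.length := by omega
      rw [PySem.List.pyRange_one_cons (by show (a : Int) < (L.length : Int); omega)]
      simp only [pvFindEndA, PySem.List.pyGetD_natCast]
      split_ifs with hc
      · exact ⟨L.getD a 0, rfl, mono a j haj hj⟩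
      · have hane : a ≠ j := by
          intro hEq
          subst hEq
          omega
        rw [show ((a : Int) + 1) = ((a + 1 : Nat) : Int) from by push_cast; ring]
        exact ih (a + 1) j (by omega) (by omega) hj hstart
  exact fun a j haj hj hs => main L.length a j (by omega) haj hj hs

lemma pyRange_len (n : Nat) :
    PySem.List.pyRange 0 (n : Int) = (List.range n).map (fun k : Nat => (k : Int)) := by
  rw [PySem.List.pyRange_one]
  simp

lemma pvBuildPos_getD (cs : List Char) (c : Char) :
    (pvBuildPos cs).getD c [] = (pvOcc cs c).map (fun t : Nat => (t : Int)) := by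
  unfold pvBuildPos
  have h1 : (PySem.List.enumerate cs).foldl
        (fun d p => d.modify p.2 [] (fun l => l ++ [p.1])) PySem.Dict.empty
      = ((PySem.List.enumerate cs).map (fun p => (p.2, p.1))).foldl
        (fun d q => d.modify q.1 [] (fun l => l ++ [q.2])) PySem.Dict.empty := by
    rw [List.foldl_map]
  rw [h1, PySem.Dict.getD_foldl_modify_append, PySem.Dict.getD_empty, List.nil_append]
  rw [List.filter_map, List.map_map]
  rw [PySem.List.enumerate_eq_map_pyRange cs 'A',
    show PySem.List.len cs = ((cs.length : Nat) : Int) from rfl, pyRange_len]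
  rw [List.map_map, List.filter_map, List.map_map]
  simp only [Function.comp_def, PySem.List.pyGetD_natCast]
  rfl

lemma pvBuildPos_keys (cs : List Char) : (pvBuildPos cs).keys = PySem.Set.ofList cs := by
  unfold pvBuildPos
  rw [PySem.Dict.keys_foldl_modify_key (PySem.List.enumerate cs) (fun p => p.2) []
      (fun _ p => fun l => l ++ [p.1]) PySem.Dict.empty]
  rw [PySem.Dict.keys_empty, PySem.List.map_snd_enumerate]
  rfl

lemma pvBuildPos_nodup (cs : List Char) : (pvBuildPos cs).keys.Nodup := by
  unfold pvBuildPos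
  exact PySem.Dict.nodup_keys_foldl_modify_key (PySem.List.enumerate cs) (fun p => p.2) []
    (fun _ p => fun l => l ++ [p.1]) PySem.Dict.empty PySem.Dict.nodup_keys_empty

lemma mem_candidates {cs : List Char} {q : Int × Int} :
    q ∈ (pvBuildPos cs).values.foldl (fun acc indices => pvInnerScan indices acc) [] ↔
      ∃ c ∈ cs, ∃ k : Nat, k < (pvOcc cs c).length ∧
        q ∈ pvDelta ((pvOcc cs c).map (fun t : Nat => (t : Int))) (k : Int) := by
  have hstep : (fun (acc : List (Int × Int)) indices => pvInnerScan indices acc)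
      = fun acc indices => acc ++ (PySem.List.pyRange 0 (PySem.List.len indices)).flatMap (pvDelta indices) := by
    funext acc ind
    exact pvInnerScan_eq ind acc
  rw [hstep, PySem.List.foldl_append_eq_flatMap, List.nil_append]
  rw [PySem.Dict.values_eq_map_keys _ (pvBuildPos_nodup cs) [], pvBuildPos_keys]
  simp only [List.mem_flatMap, List.mem_map]
  constructor
  · rintro ⟨ind, ⟨c, hcmem, rfl⟩, i, hi, hq⟩
    rw [PySem.List.mem_pyRange_one] at hi
    rw [pvBuildPos_getD] at hi hq
    have hlen : PySem.List.len ((pvOcc cs c).map (fun t : Nat => (t : Int)))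
        = ((pvOcc cs c).length : Int) := by
      simp [PySem.List.len]
    rw [hlen] at hi
    refine ⟨c, (PySem.Set.mem_ofList cs c).mp hcmem, i.toNat, by omega, ?_⟩
    rw [show ((i.toNat : Nat) : Int) = i from by omega]
    exact hq
  · rintro ⟨c, hcmem, k, hk, hq⟩
    refine ⟨(pvOcc cs c).map (fun t : Nat => (t : Int)),
      ⟨c, (PySem.Set.mem_ofList cs c).mpr hcmem, (pvBuildPos_getD cs c)⟩, (k : Int), ?_, hq⟩
    rw [PySem.List.mem_pyRange_one]
    refine ⟨by omega, ?_⟩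
    show (k : Int) < PySem.List.len ((pvOcc cs c).map (fun t : Nat => (t : Int)))
    simp only [PySem.List.len, List.length_map]
    omega

lemma cand_sound {cs : List Char} {q : Int × Int}
    (h : q ∈ (pvBuildPos cs).values.foldl (fun acc indices => pvInnerScan indices acc) []) :
    pvSound cs q := by
  obtain ⟨c, hcmem, k, hk, hq⟩ := mem_candidates.mp h
  set L := (pvOcc cs c).map (fun t : Nat => (t : Int)) with hL
  unfold pvDelta at hq
  rcases hfe : pvFindEndA L (PySem.List.pyGetD L (k : Int) 0)
      (PySem.List.pyRange ((k : Int) + 1) (PySem.List.len L)) with _ | e <;> rw [hfe] at hq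
  · simp at hq
  · simp only [List.mem_singleton] at hq
    rw [show ((k : Int) + 1) = ((k + 1 : Nat) : Int) from by push_cast; ring] at hfe
    obtain ⟨j, hj1, hj2, hj3, hj4⟩ := pvFindEndA_sound (k + 1) hfe
    have hLlen : L.length = (pvOcc cs c).length := by simp [hL]
    have hkL : k < L.length := by omega
    have hjL : j < (pvOcc cs c).length := by omega
    have hgk : PySem.List.pyGetD L (k : Int) 0 = (((pvOcc cs c)[k]'(by omega) : Nat) : Int) := by
      rw [PySem.List.pyGetD_natCast, List.getD_eq_getElem L 0 hkL]
      simp only [hL, List.getElem_map]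
    have hge : e = (((pvOcc cs c)[j]'hjL : Nat) : Int) := by
      rw [hj3, List.getD_eq_getElem L 0 hj2]
      simp only [hL, List.getElem_map]
    have hsk := mem_pvOcc.mp (List.getElem_mem (l := pvOcc cs c) (by omega : k < (pvOcc cs c).length))
    have hsj := mem_pvOcc.mp (List.getElem_mem hjL)
    refine ⟨(pvOcc cs c)[k]'(by omega), (pvOcc cs c)[j]'hjL, ?_, ?_, hsj.1, ?_⟩
    · rw [hq, hgk, hge]
    · rw [hgk, hge] at hj4
      omega
    · rw [hsk.2, hsj.2]

lemma cand_complete {cs : List Char} {s' e' : Nat} (he : e' < cs.length) (hs : s' + 3 ≤ e')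
    (hc : cs.getD s' 'A' = cs.getD e' 'A') :
    ∃ q ∈ (pvBuildPos cs).values.foldl (fun acc indices => pvInnerScan indices acc) [],
      q.1 = (s' : Int) ∧ q.2 ≤ (e' : Int) := by
  set c := cs.getD e' 'A' with hcdef
  have hs'mem : s' ∈ pvOcc cs c := mem_pvOcc.mpr ⟨by omega, hc⟩
  have he'mem : e' ∈ pvOcc cs c := mem_pvOcc.mpr ⟨he, rfl⟩
  obtain ⟨k, hkl, hks⟩ := List.mem_iff_getElem.mp hs'mem
  obtain ⟨j, hjl, hje⟩ := List.mem_iff_getElem.mp he'mem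
  have hkj : k < j := by
    rcases Nat.lt_or_ge k j with h | h
    · exact h
    · exfalso
      rcases Nat.lt_or_ge j k with h2 | h2
      · have := pvOcc_strictMono h2 hkl
        omega
      · have : k = j := by omega
        subst this
        omega
  set L := (pvOcc cs c).map (fun t : Nat => (t : Int)) with hL
  have hLlen : L.length = (pvOcc cs c).length := by simp [hL]
  have hmono : ∀ k1 k2 : Nat, k1 ≤ k2 → k2 < L.length → L.getD k1 0 ≤ L.getD k2 0 := by
    intro k1 k2 h12 h2
    have h2' : k2 < (pvOcc cs c).length := by omega
    rw [List.getD_eq_getElem L 0 (by omega), List.getD_eq_getElem L 0 h2]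
    simp only [hL, List.getElem_map]
    rcases Nat.lt_or_ge k1 k2 with hlt | hge
    · exact_mod_cast (pvOcc_strictMono hlt h2').le
    · have hk12 : k1 = k2 := by omega
      subst hk12
      rfl
  have hgj : L.getD j 0 = (e' : Int) := by
    rw [List.getD_eq_getElem L 0 (by omega)]
    simp only [hL, List.getElem_map, hje]
  have hgk : L.getD k 0 = (s' : Int) := by
    rw [List.getD_eq_getElem L 0 (by omega)]
    simp only [hL, List.getElem_map, hks]
  obtain ⟨e, hfe, hle⟩ := pvFindEndA_complete (start := (s' : Int)) hmono (k + 1) j (by omega)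
    (by omega) (by rw [hgj]; omega)
  refine ⟨((s' : Int), e), ?_, rfl, by rw [← hgj]; exact hle⟩
  rw [mem_candidates]
  refine ⟨c, ?_, k, by omega, ?_⟩
  · have hgetE : cs.getD e' 'A' = cs[e']'he := List.getD_eq_getElem cs 'A' he
    rw [hcdef, hgetE]
    exact List.getElem_mem he
  · unfold pvDelta
    rw [show ((k : Int) + 1) = ((k + 1 : Nat) : Int) from by push_cast; ring]
    rw [← hL, PySem.List.pyGetD_natCast, hgk, hfe]
    simp

-- greedy interval scheduling over an end-sorted sound & complete list computes pvM
lemma pvGL (cs : List Char) :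
    ∀ (L : List (Int × Int)) (ans last : Int),
      L.Pairwise (fun x y => x.2 ≤ y.2) →
      (∀ p ∈ L, pvSound cs p) →
      (∀ (l' : Int) (e₂ : Nat), last ≤ l' → e₂ < cs.length → pvGood cs l' e₂ = true →
        ∃ p ∈ L, l' < p.1 ∧ p.2 ≤ (e₂ : Int)) →
      (L.foldl (fun st p => if p.1 > st.2 then (st.1 + 1, p.2) else st) (ans, last)).1
        = ans + pvM cs last := by
  intro L
  induction L with
  | nil =>
    intro ans last _ _ hcomp
    have h0 : pvM cs last = 0 := by
      apply pvM_zero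
      intro e he
      rcases hb : pvGood cs last e with _ | _
      · rfl
      · obtain ⟨p, hp, -⟩ := hcomp last e (le_refl last) he hb
        exact absurd hp (List.not_mem_nil)
    simp [h0]
  | cons hd tl ih =>
    intro ans last hpair hsound hcomp
    obtain ⟨sN, eN, hhd, hs3, heN, hch⟩ := hsound hd List.mem_cons_self
    rw [List.foldl_cons]
    by_cases hpick : hd.1 > last
    · have hsN : (sN : Int) > last := by rw [hhd] at hpick; exact hpick
      have hgood : pvGood cs last eN = true := by
        unfold pvGood
        rw [decide_eq_true_eq]
        exact ⟨sN, by omega, by omega, by omega, hch⟩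
      have hmin : ∀ t, t < eN → pvGood cs last t = false := by
        intro t ht
        rcases hb : pvGood cs last t with _ | _
        · rfl
        · exfalso
          obtain ⟨p, hp, hp1, hp2⟩ := hcomp last t (le_refl last) (by omega) hb
          rcases List.mem_cons.mp hp with rfl | hpt
          · rw [hhd] at hp2
            simp only at hp2
            omega
          · have h1 : hd.2 ≤ p.2 := (List.pairwise_cons.mp hpair).1 p hpt
            rw [hhd] at h1
            simp only at h1
            omega
      rw [if_pos hpick]
      have hcomp' : ∀ (l' : Int) (e₂ : Nat), (eN : Int) ≤ l' → e₂ < cs.length →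
          pvGood cs l' e₂ = true → ∃ p ∈ tl, l' < p.1 ∧ p.2 ≤ (e₂ : Int) := by
        intro l' e₂ hl' he₂ hg
        obtain ⟨p, hp, hp1, hp2⟩ := hcomp l' e₂ (by omega) he₂ hg
        rcases List.mem_cons.mp hp with rfl | hpt
        · exfalso
          rw [hhd] at hp1
          simp only at hp1
          omega
        · exact ⟨p, hpt, hp1, hp2⟩
      have hmain := ih (ans + 1) (eN : Int) (List.pairwise_cons.mp hpair).2
        (fun p hp => hsound p (List.mem_cons_of_mem hd hp)) hcomp'
      have hacc : ((ans, last).1 + 1, hd.2) = (ans + 1, (eN : Int)) := by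
        rw [hhd]
      rw [hacc, hmain, pvM_succ heN hgood hmin]
      ring
    · rw [if_neg hpick]
      have hsN : ¬ ((sN : Int) > last) := by rw [hhd] at hpick; exact hpick
      apply ih ans last (List.pairwise_cons.mp hpair).2
        (fun p hp => hsound p (List.mem_cons_of_mem hd hp))
      intro l' e₂ hl' he₂ hg
      obtain ⟨p, hp, hp1, hp2⟩ := hcomp l' e₂ hl' he₂ hg
      rcases List.mem_cons.mp hp with rfl | hpt
      · exfalso
        rw [hhd] at hp1
        simp only at hp1
        omega
      · exact ⟨p, hpt, hp1, hp2⟩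

lemma A_eq (word : String) : maxSubstrings word = pvM word.toList (-1) := by
  unfold maxSubstrings
  have hpair := PySem.List.sorted_pairwise
    ((pvBuildPos word.toList).values.foldl (fun acc indices => pvInnerScan indices acc) [])
    (fun x : Int × Int => x.2)
  have hsound : ∀ p ∈ PySem.List.sorted
      ((pvBuildPos word.toList).values.foldl (fun acc indices => pvInnerScan indices acc) [])
      (fun x : Int × Int => x.2) false, pvSound word.toList p := by
    intro p hp
    exact cand_sound ((PySem.List.mem_sorted _ _ _ _).mp hp)
  have hcomp : ∀ (l' : Int) (e₂ : Nat), (-1 : Int) ≤ l' → e₂ < word.toList.length →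
      pvGood word.toList l' e₂ = true →
      ∃ p ∈ PySem.List.sorted
        ((pvBuildPos word.toList).values.foldl (fun acc indices => pvInnerScan indices acc) [])
        (fun x : Int × Int => x.2) false, l' < p.1 ∧ p.2 ≤ (e₂ : Int) := by
    intro l' e₂ _ he₂ hg
    unfold pvGood at hg
    obtain ⟨s, hse, hls, hs3, hch⟩ := of_decide_eq_true hg
    obtain ⟨q, hq, hq1, hq2⟩ := cand_complete he₂ (by omega) hch
    exact ⟨q, (PySem.List.mem_sorted _ _ _ _).mpr hq, by rw [hq1]; omega, hq2⟩
  rw [pvGL word.toList _ 0 (-1) hpair hsound hcomp]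
  ring

-- ---------- B side ----------

-- first occurrence of c in the window [p0, p)
def pvFirst (cs : List Char) (p0 p : Nat) (c : Char) : Option Int :=
  (((List.range' p0 (p - p0)).filter (fun t => cs.getD t 'A' == c)).head?).map
    (fun t : Nat => (t : Int))

lemma head?_min {l : List Nat} (hl : l.Pairwise (· < ·)) {h0 y : Nat}
    (hh : l.head? = some h0) (hy : y ∈ l) : h0 ≤ y := by
  cases l with
  | nil => simp at hh
  | cons a t =>
    simp only [List.head?_cons, Option.some_inj] at hh
    subst hh
    rcases List.mem_cons.mp hy with rfl | hyt
    · exact le_refl y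
    · exact Nat.le_of_lt ((List.pairwise_cons.mp hl).1 y hyt)

lemma pvBinv (cs : List Char) :
    ∀ (f p p0 : Nat) (ans : Int) (d : PySem.Dict Char Int),
      cs.length ≤ p + f → p0 ≤ p → p ≤ cs.length →
      (∀ c, d.get? c = pvFirst cs p0 p c) →
      (∀ e, e < p → pvGood cs ((p0 : Int) - 1) e = false) →
      ((PySem.List.enumerate (cs.drop p) (p : Int)).foldl pvStepB (ans, d)).1
        = ans + pvM cs ((p0 : Int) - 1) := by
  intro f
  induction f with
  | zero =>
    intro p p0 ans d hf hp0 hpn h1 h2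
    rw [List.drop_of_length_le (by omega), PySem.List.enumerate_nil, List.foldl_nil]
    have h0 : pvM cs ((p0 : Int) - 1) = 0 := pvM_zero (fun e he => h2 e (by omega))
    simp [h0]
  | succ f ih =>
    intro p p0 ans d hf hp0 hpn h1 h2
    rcases Nat.lt_or_ge p cs.length with hp | hp
    · rw [List.drop_eq_getElem_cons hp, PySem.List.enumerate_cons, List.foldl_cons]
      set c := cs[p]'hp with hcdef
      have hgetD : cs.getD p 'A' = c := List.getD_eq_getElem cs 'A' hp
      have hwin : List.range' p0 (p + 1 - p0) = List.range' p0 (p - p0) ++ [p] := by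
        rw [show p + 1 - p0 = (p - p0) + 1 from by omega, List.range'_1_concat,
          show p0 + (p - p0) = p from by omega]
      have hcast : ((p : Int) + 1) = ((p + 1 : Nat) : Int) := by push_cast; ring
      have hfilp : ∀ c'' : Char, List.filter (fun t => cs.getD t 'A' == c'') [p]
          = if c = c'' then [p] else [] := by
        intro c''
        simp only [List.filter_cons, List.filter_nil]
        rw [hgetD]
        by_cases h : c = c''
        · subst h
          simp
        · simp [h]
      have hpairf : ((List.range' p0 (p - p0)).filter (fun t => cs.getD t 'A' == c)).Pairwise (· < ·) :=
        List.Pairwise.filter _ (List.pairwise_lt_range' 1)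
      rcases hdc : d.get? c with _ | s
      · -- ch not seen in the window: first[ch] = i
        have hstep : pvStepB (ans, d) ((p : Int), c) = (ans, d.insert c (p : Int)) := by
          simp [pvStepB, hdc]
        rw [hstep, hcast]
        have hempty : List.filter (fun t => cs.getD t 'A' == c) (List.range' p0 (p - p0)) = [] := by
          have hh := h1 c
          rw [hdc] at hh
          unfold pvFirst at hh
          rcases hfl : List.filter (fun t => cs.getD t 'A' == c) (List.range' p0 (p - p0)) with _ | ⟨a, t⟩
          · rfl
          · rw [hfl] at hh
            simp at hh
        apply ih (p + 1) p0 ans _ (by omega) (by omega) (by omega)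
        · intro c'
          rw [PySem.Dict.get?_insert]
          unfold pvFirst
          rw [hwin, List.filter_append, hfilp c']
          split_ifs with hcc hcc2 hcc2
          · subst hcc
            rw [hempty]
            rfl
          · exact absurd hcc.symm hcc2
          · exact absurd hcc2.symm hcc
          · rw [List.append_nil]
            exact h1 c'
        · intro e he
          rcases Nat.lt_or_ge e p with hep | hep
          · exact h2 e hep
          · have hep' : e = p := by omega
            rw [hep']
            unfold pvGood
            rw [decide_eq_false_iff_not]
            rintro ⟨s', hs'e, hls', hs'3, hch⟩
            have hs'win : s' ∈ List.filter (fun t => cs.getD t 'A' == c) (List.range' p0 (p - p0)) := by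
              rw [List.mem_filter, List.mem_range'_1]
              refine ⟨⟨by omega, by omega⟩, ?_⟩
              show (cs.getD s' 'A' == c) = true
              rw [hch, hgetD]
              exact beq_self_eq_true c
            rw [hempty] at hs'win
            exact absurd hs'win (List.not_mem_nil)
      · -- ch seen before at s = first occurrence t0
        have hfirst := h1 c
        rw [hdc] at hfirst
        unfold pvFirst at hfirst
        obtain ⟨t0, ht0, hst0⟩ := Option.map_eq_some_iff.mp hfirst.symm
        have ht0mem : t0 ∈ List.filter (fun t => cs.getD t 'A' == c) (List.range' p0 (p - p0)) :=
          List.mem_of_mem_head? (by rw [ht0]; rfl)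
        have ht0win : p0 ≤ t0 ∧ t0 < p := by
          have hm := (List.mem_filter.mp ht0mem).1
          rw [List.mem_range'_1] at hm
          omega
        have ht0ch : cs.getD t0 'A' = c := by
          have hm := (List.mem_filter.mp ht0mem).2
          simpa using hm
        by_cases hge : (p : Int) - s ≥ 3
        · -- close a substring here
          have hstep : pvStepB (ans, d) ((p : Int), c) = (ans + 1, PySem.Dict.empty) := by
            simp [pvStepB, hdc, hge]
          rw [hstep, hcast]
          have hgood : pvGood cs ((p0 : Int) - 1) p = true := by
            unfold pvGood
            rw [decide_eq_true_eq]
            refine ⟨t0, by omega, by omega, by omega, by rw [ht0ch, hgetD]⟩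
          have hM := pvM_succ hp hgood h2
          have hinv1 : ∀ c', (PySem.Dict.empty : PySem.Dict Char Int).get? c'
              = pvFirst cs (p + 1) (p + 1) c' := by
            intro c'
            rw [PySem.Dict.get?_empty]
            unfold pvFirst
            rw [show p + 1 - (p + 1) = 0 from by omega]
            rfl
          have hinv2 : ∀ e, e < p + 1 → pvGood cs (((p + 1 : Nat) : Int) - 1) e = false := by
            intro e he
            unfold pvGood
            rw [decide_eq_false_iff_not]
            rintro ⟨s', hs'e, hls', hs'3, -⟩
            omega
          rw [ih (p + 1) (p + 1) (ans + 1) PySem.Dict.empty (by omega) (by omega) (by omega) hinv1 hinv2]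
          rw [show ((p + 1 : Nat) : Int) - 1 = (p : Int) from by push_cast; ring, hM]
          ring
        · -- window still too short, dict unchanged
          have hstep : pvStepB (ans, d) ((p : Int), c) = (ans, d) := by
            simp [pvStepB, hdc, hge]
          rw [hstep, hcast]
          apply ih (p + 1) p0 ans d (by omega) (by omega) (by omega)
          · intro c'
            rw [h1 c']
            unfold pvFirst
            rw [hwin, List.filter_append, hfilp c']
            by_cases hcc : c = c'
            · rw [if_pos hcc]
              subst hcc
              rw [List.head?_append, ht0]
              rfl
            · rw [if_neg hcc, List.append_nil]
          · intro e he
            rcases Nat.lt_or_ge e p with hep | hep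
            · exact h2 e hep
            · have hep' : e = p := by omega
              rw [hep']
              unfold pvGood
              rw [decide_eq_false_iff_not]
              rintro ⟨s', hs'e, hls', hs'3, hch⟩
              have hs'mem : s' ∈ List.filter (fun t => cs.getD t 'A' == c) (List.range' p0 (p - p0)) := by
                rw [List.mem_filter, List.mem_range'_1]
                refine ⟨⟨by omega, by omega⟩, ?_⟩
                show (cs.getD s' 'A' == c) = true
                rw [hch, hgetD]
                exact beq_self_eq_true c
              have hmin := head?_min hpairf ht0 hs'mem
              omega
    · rw [List.drop_of_length_le (by omega), PySem.List.enumerate_nil, List.foldl_nil]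
      have h0 : pvM cs ((p0 : Int) - 1) = 0 := pvM_zero (fun e he => h2 e (by omega))
      simp [h0]

lemma B_eq (word : String) : maxSubstrings_alt word = pvM word.toList (-1) := by
  unfold maxSubstrings_alt
  have h := pvBinv word.toList word.toList.length 0 0 0 PySem.Dict.empty
    (by omega) (by omega) (by omega)
    (fun c => by
      rw [PySem.Dict.get?_empty]
      unfold pvFirst
      rfl)
    (fun e he => by omega)
  rw [List.drop_zero] at h
  rw [show ((0 : Nat) : Int) = 0 from rfl] at h
  rw [h]
  norm_num

-- ===== VERDICT (by name: the statement is the Claim_ definition above) =====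
theorem maxSubstrings_spec : Claim_equal_maxSubstrings := by
  intro word _
  unfold Spec_maxSubstrings
  rw [A_eq, B_eq]
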